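-- pv_equiv track=rewrite | github.com/mrchipsers/code | Python/rle.py | anti67
-- ===== SOURCE A (Python) =====
-- def anti67(lst: list):
-- 	out=0
-- 	remove=False
-- 	for i in lst:
-- 		if i==7 and remove:
-- 			remove=False
-- 		elif i==6 or remove:
-- 			remove=True
-- 		else:
-- 			out+=i
-- 	return out
-- ===== SOURCE B (Python) =====
-- def anti67(lst: list):
-- 	out = 0
-- 	i = 0
-- 	n = len(lst)
-- 	while i < n:
-- 		if lst[i] == 6:
-- 			i += 1
-- 			while i < n and lst[i] != 7:
-- 				i += 1
-- 			i += 1  # skip the terminating 7 (or walk off the end)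
-- 		else:
-- 			out += lst[i]
-- 			i += 1
-- 	return out
-- ===== Notes on version B (the rewrite author's own statement) =====
-- stated objective: alternative
-- what changed: Replaces the flag-based single pass with an index loop that, on seeing a 6, consumes the span with an inner while loop up to and including the next 7 (or the end), so no remove flag is maintained.
import Mathlib
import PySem

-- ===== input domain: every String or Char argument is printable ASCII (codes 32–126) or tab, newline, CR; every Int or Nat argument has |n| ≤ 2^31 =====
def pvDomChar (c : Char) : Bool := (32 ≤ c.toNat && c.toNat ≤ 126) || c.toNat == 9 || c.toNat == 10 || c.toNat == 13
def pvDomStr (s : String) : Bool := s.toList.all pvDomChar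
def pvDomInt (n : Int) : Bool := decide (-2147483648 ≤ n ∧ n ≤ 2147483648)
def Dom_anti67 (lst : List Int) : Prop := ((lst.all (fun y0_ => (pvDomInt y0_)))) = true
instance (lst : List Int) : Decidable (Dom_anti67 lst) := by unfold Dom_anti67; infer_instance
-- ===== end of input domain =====

-- B replaces A's remove-flag single pass by a consume-until-sentinel loop: on a 6 it
-- skips ahead past the next 7 (or to the end) with an inner loop; no flag is kept.

-- ===== PORT A =====
-- A: fold over the list with state (out, remove), branches in A's order.
def anti67 (lst : List Int) : Int :=
  (lst.foldl
    (fun (s : Int × Bool) i =>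
      if i = 7 ∧ s.2 = true then (s.1, false)
      else if i = 6 ∨ s.2 = true then (s.1, true)
      else (s.1 + i, s.2))
    (0, false)).1

-- ===== PORT B =====
-- B's inner while loop: advance until a 7 is found (consuming it) or the list ends.
def anti67_skip : List Int → List Int
  | [] => []
  | x :: xs => if x = 7 then xs else anti67_skip xs

theorem anti67_skip_len_le (xs : List Int) : (anti67_skip xs).length ≤ xs.length := by
  induction xs with
  | nil => simp [anti67_skip]
  | cons x xs ih =>
    simp only [anti67_skip]
    split
    · simp
    · exact le_trans ih (Nat.le_succ _)

-- B's outer loop: at a 6, jump past the span via anti67_skip; otherwise add and advance.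
def anti67_alt : List Int → Int
  | [] => 0
  | x :: xs => if x = 6 then anti67_alt (anti67_skip xs) else x + anti67_alt xs
termination_by l => l.length
decreasing_by
  · exact Nat.lt_succ_of_le (anti67_skip_len_le xs)
  · simp

-- ===== PRECONDITION & SPEC =====
def Spec_anti67 (lst : List Int) (out : Int) : Prop := out = anti67_alt lst
instance (lst : List Int) (out : Int) : Decidable (Spec_anti67 lst out) := by unfold Spec_anti67; infer_instance

-- ===== CLAIM (what is proved, stated in full; the proofs are below) =====
def Claim_equal_anti67 : Prop := ∀ (lst : List Int), Dom_anti67 lst → Spec_anti67 lst (anti67 lst)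

-- ===== LEMMAS AND PROOFS =====

-- the step function of A's fold, named for the lemmas
def anti67_step (s : Int × Bool) (i : Int) : Int × Bool :=
  if i = 7 ∧ s.2 = true then (s.1, false)
  else if i = 6 ∨ s.2 = true then (s.1, true)
  else (s.1 + i, s.2)

-- with remove = true, the fold ignores everything up to and including the next 7,
-- i.e. it behaves like the fold with remove = false on anti67_skip xs
theorem anti67_fold_true (xs : List Int) (out : Int) :
    (xs.foldl anti67_step (out, true)).1 = ((anti67_skip xs).foldl anti67_step (out, false)).1 := by
  induction xs generalizing out with
  | nil => simp [anti67_skip]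
  | cons x xs ih =>
    by_cases hx : x = 7
    · simp [anti67_skip, anti67_step, hx]
    · have hstep : anti67_step (out, true) x = (out, true) := by
        simp [anti67_step, hx]
      simp [anti67_skip, hx, List.foldl_cons, hstep, ih]

-- with remove = false, the fold's output is out + anti67_alt xs
theorem anti67_fold_false (xs : List Int) :
    ∀ out : Int, (xs.foldl anti67_step (out, false)).1 = out + anti67_alt xs := by
  induction xs using anti67_alt.induct with
  | case1 => simp [anti67_alt]
  | case2 xs ih =>
    intro out
    have hstep : anti67_step (out, false) (6 : Int) = (out, true) := by
      simp [anti67_step]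
    simp only [List.foldl_cons, hstep, anti67_fold_true, ih, anti67_alt]
    simp
  | case3 x xs hx ih =>
    intro out
    have hstep : anti67_step (out, false) x = (out + x, false) := by
      simp [anti67_step, hx]
    simp only [List.foldl_cons, hstep, ih]
    simp [anti67_alt, hx]
    ring

-- ===== VERDICT (by name: the statement is the Claim_ definition above) =====
theorem anti67_spec : Claim_equal_anti67 := by
  intro lst _
  show (lst.foldl _ ((0 : Int), false)).1 = anti67_alt lst
  have h : (lst.foldl anti67_step ((0 : Int), false)).1 = 0 + anti67_alt lst :=
    anti67_fold_false lst 0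
  simpa [anti67, anti67_step] using h
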